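-- pv_equiv track=rewrite | github.com/Patrone411/waymo_scenario_extraction | scenario_extraction/scenario_matching/matching/post/block_combine.py | _max_possible_windows
-- ===== SOURCE A (Python) =====
-- def _max_possible_windows(T: int, minF: int, maxF: int) -> int:
--     """
--     Count all theoretical (t0,t1) with window length in [minF..maxF] within [0..T-1].
--     Inclusive indices.
--     """
--     T = int(T)
--     minF = max(1, int(minF))
--     maxF = max(minF, int(maxF))
--     total = 0
--     for t0 in range(T):
--         t1_min = t0 + minF - 1
--         t1_max = min(T - 1, t0 + maxF - 1)
--         if t1_min <= t1_max:
--             total += (t1_max - t1_min + 1)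
--     return int(total)
-- ===== SOURCE B (Python) =====
-- def _max_possible_windows(T: int, minF: int, maxF: int) -> int:
--     # Closed form: for each window length L in [minF..maxF] with L <= T there are
--     # T - L + 1 windows; sum the arithmetic series analytically in O(1).
--     T = int(T)
--     m = max(1, int(minF))
--     M = min(max(m, int(maxF)), T)
--     if M < m:
--         return 0
--     k = M - m + 1
--     return k * (2 * T + 2 - m - M) // 2
-- ===== Notes on version B (the rewrite author's own statement) =====
-- stated objective: faster
-- what changed: Replaces the O(T) loop over window start positions by a closed-form arithmetic-series formula over window lengths, computed in O(1).
import Mathlib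
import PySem

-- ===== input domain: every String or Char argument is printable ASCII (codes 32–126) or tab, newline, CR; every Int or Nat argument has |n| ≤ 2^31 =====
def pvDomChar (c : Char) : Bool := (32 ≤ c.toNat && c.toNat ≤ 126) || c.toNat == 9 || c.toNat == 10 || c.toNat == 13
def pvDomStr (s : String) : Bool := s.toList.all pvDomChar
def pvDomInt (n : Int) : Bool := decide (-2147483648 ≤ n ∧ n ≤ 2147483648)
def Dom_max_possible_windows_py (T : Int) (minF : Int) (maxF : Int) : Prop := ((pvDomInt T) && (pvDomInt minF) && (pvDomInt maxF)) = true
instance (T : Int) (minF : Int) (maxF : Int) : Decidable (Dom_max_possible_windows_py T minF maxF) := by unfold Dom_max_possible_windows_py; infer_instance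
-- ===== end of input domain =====

-- B replaces A's O(T) loop over start positions by a closed-form arithmetic-series formula (objective: faster).

-- ===== PORT A =====
-- A's 'for t0 in range(T)' as a tail-recursive counting loop over the same state (t0, total).
def pvLoopA (T : Int) (minF : Int) (maxF : Int) : Nat → Int → Int → Int
  | 0, _, total => total
  | n + 1, t0, total =>
    let t1_min := t0 + minF - 1
    let t1_max := min (T - 1) (t0 + maxF - 1)
    pvLoopA T minF maxF n (t0 + 1) (if t1_min ≤ t1_max then total + (t1_max - t1_min + 1) else total)

def max_possible_windows_py (T : Int) (minF : Int) (maxF : Int) : Int :=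
  let minF := max 1 minF
  let maxF := max minF maxF
  let total : Int := pvLoopA T minF maxF T.toNat 0 0
  total

-- ===== PORT B =====
def max_possible_windows_py_alt (T : Int) (minF : Int) (maxF : Int) : Int :=
  let m := max 1 minF
  let M := min (max m maxF) T
  if M < m then 0
  else
    let k := M - m + 1
    PySem.Int.floordiv (k * (2 * T + 2 - m - M)) 2

-- ===== PRECONDITION & SPEC =====
def Spec_max_possible_windows_py (T : Int) (minF : Int) (maxF : Int) (out : Int) : Prop := out = max_possible_windows_py_alt T minF maxF
instance (T : Int) (minF : Int) (maxF : Int) (out : Int) : Decidable (Spec_max_possible_windows_py T minF maxF out) := by unfold Spec_max_possible_windows_py; infer_instance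

-- ===== CLAIM (what is proved, stated in full; the proofs are below) =====
def Claim_equal_max_possible_windows_py : Prop := ∀ (T : Int) (minF : Int) (maxF : Int), Dom_max_possible_windows_py T minF maxF → Spec_max_possible_windows_py T minF maxF (max_possible_windows_py T minF maxF)

-- ===== LEMMAS AND PROOFS =====

-- Per-iteration contribution of A's loop for start position t0 (as a summand).
def pvTerm (T m M' t0 : Int) : Int :=
  if t0 + m - 1 ≤ min (T - 1) (t0 + M' - 1) then min (T - 1) (t0 + M' - 1) - (t0 + m - 1) + 1 else 0

-- Twice the closed form B computes (before the final exact halving).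
def pvPhi2 (T m M' : Int) : Int :=
  if min M' T < m then 0 else (min M' T - m + 1) * (2 * T + 2 - m - min M' T)

theorem pvTerm_shift (T m M' : Int) (k : Int) :
    pvTerm T m M' (k + 1) = pvTerm (T - 1) m M' k := by
  unfold pvTerm
  split_ifs <;> omega

theorem pvPhi2_step (T m M' : Int) (_hm : 1 ≤ m) (hM : m ≤ M') (_hT : 1 ≤ T) :
    pvPhi2 T m M' = 2 * pvTerm T m M' 0 + pvPhi2 (T - 1) m M' := by
  unfold pvPhi2 pvTerm
  by_cases h : T ≤ M'
  · rw [min_eq_right h, min_eq_right (by omega : T - 1 ≤ M'),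
      min_eq_left (by omega : T - 1 ≤ 0 + M' - 1)]
    by_cases h1 : T < m
    · rw [if_pos h1, if_neg (by omega : ¬ (0 + m - 1 ≤ T - 1)), if_pos (by omega : T - 1 < m)]
      norm_num
    · by_cases h3 : T - 1 < m
      · rw [if_neg h1, if_pos (by omega : 0 + m - 1 ≤ T - 1), if_pos h3]
        rw [show T = m from by omega]
        ring
      · rw [if_neg h1, if_pos (by omega : 0 + m - 1 ≤ T - 1), if_neg h3]
        ring
  · rw [min_eq_left (by omega : M' ≤ T), min_eq_left (by omega : M' ≤ T - 1),
      min_eq_right (by omega : 0 + M' - 1 ≤ T - 1)]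
    rw [if_neg (by omega : ¬ M' < m), if_pos (by omega : 0 + m - 1 ≤ 0 + M' - 1),
      if_neg (by omega : ¬ M' < m)]
    ring

theorem pvSum_eq (n : Nat) : ∀ (T m M' : Int), 1 ≤ m → m ≤ M' → T = (n : Int) →
    2 * ((List.range n).map (fun (k : Nat) => pvTerm T m M' (k : Int))).sum = pvPhi2 T m M' := by
  induction n with
  | zero =>
    intro T m M' hm hM hT
    have h0 : min M' T < m := by omega
    unfold pvPhi2
    rw [if_pos h0]
    simp
  | succ n ih =>
    intro T m M' hm hM hT
    rw [List.range_succ_eq_map]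
    simp only [List.map_cons, List.map_map, List.sum_cons]
    have hmap : (List.range n).map ((fun (k : Nat) => pvTerm T m M' (k : Int)) ∘ Nat.succ)
        = (List.range n).map (fun (k : Nat) => pvTerm (T - 1) m M' (k : Int)) := by
      apply List.map_congr_left
      intro k _
      show pvTerm T m M' ((k + 1 : Nat) : Int) = pvTerm (T - 1) m M' (k : Int)
      push_cast
      exact pvTerm_shift T m M' k
    rw [hmap, mul_add, ih (T - 1) m M' hm hM (by omega)]
    rw [pvPhi2_step T m M' hm hM (by omega)]
    push_cast
    ring

theorem pvLoopA_eq (T m M' : Int) :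
    ∀ (n : Nat) (t0 total : Int), pvLoopA T m M' n t0 total
      = total + ((List.range n).map (fun (k : Nat) => pvTerm T m M' (t0 + (k : Int)))).sum := by
  intro n
  induction n with
  | zero => intro t0 total; simp [pvLoopA]
  | succ n ih =>
    intro t0 total
    show pvLoopA T m M' n (t0 + 1)
        (if t0 + m - 1 ≤ min (T - 1) (t0 + M' - 1) then
           total + (min (T - 1) (t0 + M' - 1) - (t0 + m - 1) + 1) else total)
      = _
    have hstep : (if t0 + m - 1 ≤ min (T - 1) (t0 + M' - 1) then
        total + (min (T - 1) (t0 + M' - 1) - (t0 + m - 1) + 1) else total)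
        = total + pvTerm T m M' t0 := by
      unfold pvTerm; split_ifs <;> omega
    rw [hstep, ih]
    rw [List.range_succ_eq_map]
    simp only [List.map_cons, List.map_map, List.sum_cons]
    have hmap : (List.range n).map ((fun (k : Nat) => pvTerm T m M' (t0 + (k : Int))) ∘ Nat.succ)
        = (List.range n).map (fun (k : Nat) => pvTerm T m M' (t0 + 1 + (k : Int))) := by
      apply List.map_congr_left
      intro k _
      show pvTerm T m M' (t0 + ((k + 1 : Nat) : Int)) = pvTerm T m M' (t0 + 1 + (k : Int))
      push_cast
      ring_nf
    rw [hmap]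
    ring_nf

theorem loop_eq_sum (T m M' : Int) :
    pvLoopA T m M' T.toNat 0 0
    = ((List.range T.toNat).map (fun (k : Nat) => pvTerm T m M' (k : Int))).sum := by
  rw [pvLoopA_eq T m M' T.toNat 0 0, zero_add]
  apply congrArg List.sum
  apply List.map_congr_left
  intro k _
  show pvTerm T m M' (0 + (k : Int)) = pvTerm T m M' (k : Int)
  rw [zero_add]

-- ===== VERDICT (by name: the statement is the Claim_ definition above) =====
theorem max_possible_windows_py_spec : Claim_equal_max_possible_windows_py := by
  intro T minF maxF _
  have hA : max_possible_windows_py T minF maxF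
      = pvLoopA T (max 1 minF) (max (max 1 minF) maxF) T.toNat 0 0 := rfl
  have hB : max_possible_windows_py_alt T minF maxF
      = (if min (max (max 1 minF) maxF) T < max 1 minF then 0
         else PySem.Int.floordiv ((min (max (max 1 minF) maxF) T - (max 1 minF) + 1)
              * (2 * T + 2 - (max 1 minF) - min (max (max 1 minF) maxF) T)) 2) := rfl
  unfold Spec_max_possible_windows_py
  rw [hA, hB]
  set m := max 1 minF with hm
  set M' := max m maxF with hM'
  have h1 : (1 : Int) ≤ m := le_max_left _ _
  have h2 : m ≤ M' := le_max_left _ _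
  rw [loop_eq_sum T m M']
  by_cases hT : T ≤ 0
  · -- empty loop on the left; min M' T ≤ 0 < m so B returns 0
    have h0 : T.toNat = 0 := by omega
    rw [h0, if_pos (show min M' T < m by omega)]
    simp
  · have hsum := pvSum_eq T.toNat T m M' h1 h2 (by omega)
    split_ifs with hlt
    · unfold pvPhi2 at hsum
      rw [if_pos hlt] at hsum
      omega
    · unfold pvPhi2 at hsum
      rw [if_neg hlt] at hsum
      rw [← hsum, PySem.Int.floordiv_eq_ediv_of_pos (by norm_num)]
      omega
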